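-- pv_equiv track=rewrite | github.com/danitrave/DNA_project | DNA_Project/dna.py | longestSSRdin
-- ===== SOURCE A (Python) =====
-- dinucleotides = ("AA","AT","AC","AG","TT","TA","TC","TG","CC","CG","CT","CA","GG","GC","GA","GT")
--
-- def firstSSR(dna, seq):
--
--     if dna == "" or seq == "":
--         return None
--
--     dna = dna.upper()
--     seq = seq.upper()
--     count = 0
--
--     if dna.find(seq) == -1:
--         return 0
--
--     else:
--         x = dna.find(seq)
--         while dna[x:x+len(seq)] == seq:   #goes on as long as consiquent nucleotides are the same as the sequence
--             count += 1
--             x += len(seq)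
--         return count
--
--     """Returns the length (number of repeats) of the first SSR in dna
--     that repeats the sequence seq
--     Parameters:
--         dna: a string object representing a DNA sequence
--         seq: a string object representing a short sequence of DNA
--     Return value:
--         (if seq found): the integer number of seq repeats in the first SSR
--         (if seq not found): 0
--     Example: firstssr("aggcctggcggcggc", "ggc") = 1
--     """
--
-- def longestSSR(dna, seq):
--
--     if dna == "" or seq == "":
--         return None
--
--     dna = dna.upper()
--     seq = seq.upper()
--     length = 0
--
--     if dna.find(seq) == -1:
--         return 0
--
--     else:
--         while dna.find(seq) != -1:
--
--             if firstSSR(dna,seq) > length:                   #saves index if length SSR is greater than those preaviously found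
--                 length = firstSSR(dna,seq)
--
--             y = dna.find(seq) + firstSSR(dna,seq)*len(seq)   #index at which SSR ends
--             dna = dna[y:]
--
--         return length
--
--     """Returns the length of the longest SSR in dna that repeats the sequence seq
--     Parameters:
--         dna: a string object representing a DNA sequence
--         seq: a string object representing a short sequence of DNA
--     Return value:
--         (if seq found): the integer length of longest SSR in dna repeating seq
--         (if seq not found): 0
--     Example: longestSSR("aggcctggcggcggc", "gcc") = 3
--     """
--
-- def longestSSRdin(dna):
--
--     if len(dna) < 2:
--         return None
--
--     dna = dna.upper()
--     length = 0
--     dinucleotide = []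
--
--     for din in dinucleotides:             #considers all dinucleotides (see tuple start)
--         SSR_din = longestSSR(dna, din)
--
--         if SSR_din > length:
--             length = SSR_din
--             dinucleotide = [din]
--
--         elif SSR_din == length:
--             dinucleotide.append(din)    #saves all SSR of same length
--
--     return (dinucleotide , length)
--
--     """Finds the longest SSR in dna for all the possible dinucleotides
--     Parameter:
--         dna: a string object representing a DNA sequence
--     Return value: (if len(dna)>1): a pair (din, len)
--         din: a two-letter string object representing the dinucleotide with longest SSR in dna
--         len: integer representing the length of the longest SSR of din
--                   (if len(dna)<2): None
--     Example: longestSSRdin("ctctctgcgccacacaca") = ("ca", 4)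
--     """
-- ===== SOURCE B (Python) =====
-- dinucleotides = ("AA","AT","AC","AG","TT","TA","TC","TG","CC","CG","CT","CA","GG","GC","GA","GT")
--
-- def longestSSRdin(dna):
--     if len(dna) < 2:
--         return None
--     s = dna.upper()
--     n = len(s)
--     best = 0
--     best_dins = []
--     for din in dinucleotides:
--         a, b = din[0], din[1]
--         m = 0
--         i = 0
--         while i < n - 1:
--             if s[i] == a and s[i + 1] == b:
--                 run = 0
--                 while i < n - 1 and s[i] == a and s[i + 1] == b:
--                     run += 1
--                     i += 2
--                 if run > m:
--                     m = run
--             else: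
--                 i += 1
--         if m > best:
--             best = m
--             best_dins = [din]
--         elif m == best:
--             best_dins.append(din)
--     return (best_dins, best)
-- ===== Notes on version B (the rewrite author's own statement) =====
-- stated objective: faster
-- what changed: A repeatedly calls str.find and firstSSR and re-slices the remaining string (dna = dna[y:]) for each of the 16 dinucleotides; B does one left-to-right index scan per dinucleotide, counting each aligned run of the dinucleotide in place, with no rescans and no string copying.
import Mathlib
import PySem

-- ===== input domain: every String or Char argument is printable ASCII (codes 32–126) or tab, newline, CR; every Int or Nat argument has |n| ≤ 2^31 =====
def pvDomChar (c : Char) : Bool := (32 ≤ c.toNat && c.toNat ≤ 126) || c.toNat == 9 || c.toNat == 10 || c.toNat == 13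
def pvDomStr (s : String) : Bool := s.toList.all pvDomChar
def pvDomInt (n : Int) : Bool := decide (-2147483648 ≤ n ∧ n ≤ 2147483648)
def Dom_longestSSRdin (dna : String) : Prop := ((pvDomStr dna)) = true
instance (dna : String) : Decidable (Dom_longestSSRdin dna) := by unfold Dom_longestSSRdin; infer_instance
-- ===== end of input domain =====

-- B replaces A's repeated find/slice rescans (which re-copy the remaining string each
-- iteration) with a single left-to-right scan per dinucleotide; same return value.


-- ===== PORT A =====
def pvDinucleotides : List String :=
  ["AA","AT","AC","AG","TT","TA","TC","TG","CC","CG","CT","CA","GG","GC","GA","GT"]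

-- while dna[x:x+len(seq)] == seq: count += 1; x += len(seq)
-- (fuel is only a totality guard; dna.length + 1 steps are always enough)
def firstLoop (fuel : Nat) (dna seq : List Char) (x : Nat) (count : Int) : Int :=
  match fuel with
  | 0 => count
  | fuel + 1 =>
    if PySem.List.slice dna (some (x : Int)) (some ((x + seq.length : Nat) : Int)) = seq then
      firstLoop fuel dna seq (x + seq.length) (count + 1)
    else count

def firstSSR (dna seq : List Char) : Option Int :=
  if dna = [] ∨ seq = [] then none
  else
    let d := PySem.Chars.upper dna
    let sq := PySem.Chars.upper seq
    if PySem.Chars.find d sq = -1 then some 0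
    else some (firstLoop (d.length + 1) d sq (PySem.Chars.find d sq).toNat 0)

-- while dna.find(seq) != -1: … ; dna = dna[y:]
-- (fuel is only a totality guard; dna.length + 1 steps are always enough)
def longestLoop (fuel : Nat) (dna seq : List Char) (len : Int) : Int :=
  match fuel with
  | 0 => len
  | fuel + 1 =>
    if PySem.Chars.find dna seq = -1 then len
    else
      let c := (firstSSR dna seq).getD 0
      let len' := if len < c then c else len
      let y := PySem.Chars.find dna seq + c * (seq.length : Int)
      longestLoop fuel (PySem.List.slice dna (some y) none) seq len'

def longestSSR (dna seq : List Char) : Option Int :=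
  if dna = [] ∨ seq = [] then none
  else
    let d := PySem.Chars.upper dna
    let sq := PySem.Chars.upper seq
    if PySem.Chars.find d sq = -1 then some 0
    else some (longestLoop (d.length + 1) d sq 0)

def longestSSRdin (dna : String) : Option (List String × Int) :=
  if (PySem.Str.len dna : Int) < 2 then none
  else
    let u := PySem.Chars.upper dna.toList
    some (pvDinucleotides.foldl
      (fun (st : List String × Int) din =>
        let ssr := (longestSSR u din.toList).getD 0
        if st.2 < ssr then ([din], ssr)
        else if ssr = st.2 then (st.1 ++ [din], st.2)
        else st)
      ([], 0))

-- ===== PORT B =====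
-- number of back-to-back copies of [x,y] at the head of the list
def pvRun (x y : Char) : List Char → Nat
  | c :: d :: t => if c = x ∧ d = y then pvRun x y t + 1 else 0
  | _ => 0

-- one pass: on a match consume the whole aligned run, otherwise step one char
def pvScan (x y : Char) : List Char → Nat
  | c :: d :: t =>
    if h : c = x ∧ d = y then
      max (pvRun x y (c :: d :: t))
        (pvScan x y (List.drop (2 * pvRun x y (c :: d :: t)) (c :: d :: t)))
    else pvScan x y (d :: t)
  | _ => 0
termination_by l => l.length
decreasing_by
  · have hr : pvRun x y (c :: d :: t) = pvRun x y t + 1 := by simp [pvRun, h]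
    rw [List.length_drop]
    simp only [List.length_cons, hr]
    omega
  · simp only [List.length_cons]
    omega

def longestSSRdin_alt (dna : String) : Option (List String × Int) :=
  if (PySem.Str.len dna : Int) < 2 then none
  else
    let s := PySem.Chars.upper dna.toList
    some (pvDinucleotides.foldl
      (fun (st : List String × Int) din =>
        let m : Int :=
          match din.toList with
          | x :: y :: _ => ((pvScan x y s : Nat) : Int)
          | _ => 0
        if st.2 < m then ([din], m)
        else if m = st.2 then (st.1 ++ [din], st.2)
        else st)
      ([], 0))

-- ===== PRECONDITION & SPEC =====
def Spec_longestSSRdin (dna : String) (out : Option (List String × Int)) : Prop := out = longestSSRdin_alt dna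
instance (dna : String) (out : Option (List String × Int)) : Decidable (Spec_longestSSRdin dna out) := by unfold Spec_longestSSRdin; infer_instance

-- ===== CLAIM (what is proved, stated in full; the proofs are below) =====
def Claim_equal_longestSSRdin : Prop := ∀ (dna : String), Dom_longestSSRdin dna → Spec_longestSSRdin dna (longestSSRdin dna)

-- ===== LEMMAS AND PROOFS =====

theorem islower_iff (d : Char) : PySem.Chars.islower d = true ↔ (97 ≤ d.toNat ∧ d.toNat ≤ 122) := by
  simp only [PySem.Chars.islower, Bool.and_eq_true, decide_eq_true_eq, Char.le_def,
    UInt32.le_iff_toNat_le]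
  rfl

theorem upperChar_idem (c : Char) :
    PySem.Chars.upperChar (PySem.Chars.upperChar c) = PySem.Chars.upperChar c := by
  unfold PySem.Chars.upperChar
  by_cases h : PySem.Chars.islower c = true
  · rw [if_pos h]
    have hc := (islower_iff c).mp h
    have hval : (Char.ofNat (c.toNat - 32)).toNat = c.toNat - 32 := by
      rw [Char.toNat_ofNat, if_pos]
      left; omega
    have hlo : PySem.Chars.islower (Char.ofNat (c.toNat - 32)) = false := by
      rw [Bool.eq_false_iff]
      intro hl
      have := (islower_iff _).mp hl
      omega
    rw [if_neg (by simp [hlo])]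
  · rw [if_neg (by simp [h])]

theorem upper_idem (s : List Char) :
    PySem.Chars.upper (PySem.Chars.upper s) = PySem.Chars.upper s := by
  simp only [PySem.Chars.upper, List.map_map]
  exact List.map_congr_left (fun c _ => upperChar_idem c)

theorem upper_ne_nil (s : List Char) (h : s ≠ []) : PySem.Chars.upper s ≠ [] := by
  intro he
  exact h (by simpa [PySem.Chars.upper] using he)

theorem upper_drop (s : List Char) (n : Nat) (hu : PySem.Chars.upper s = s) :
    PySem.Chars.upper (List.drop n s) = List.drop n s := by
  conv_rhs => rw [← hu]
  simp [PySem.Chars.upper, List.map_drop]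

theorem prefix_pair (x y : Char) (s : List Char) :
    [x, y] <+: s ↔ ∃ t, s = x :: y :: t := by
  constructor
  · rintro ⟨t, rfl⟩
    exact ⟨t, rfl⟩
  · rintro ⟨t, rfl⟩
    exact ⟨t, rfl⟩


theorem take_two_pair (x y : Char) (l : List Char) :
    List.take 2 l = [x, y] ↔ ∃ t, l = x :: y :: t := by
  match l with
  | [] => simp
  | [a] => simp
  | a :: b :: t =>
    have hred : List.take 2 (a :: b :: t) = [a, b] := by
      simp [List.take_succ_cons]
    rw [hred]
    constructor
    · intro h
      injection h with h1 h2
      injection h2 with h2 _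
      subst h1; subst h2
      exact ⟨t, rfl⟩
    · rintro ⟨t', ht⟩
      injection ht with h1 h2
      injection h2 with h2 _
      subst h1; subst h2
      rfl

theorem find_eq_of_first (s sub : List Char) (k : Nat) (hp : sub <+: List.drop k s)
    (hmin : ∀ i < k, ¬ sub <+: List.drop i s) : PySem.Chars.find s sub = (k : Int) := by
  have hinf : sub <:+: s := hp.isInfix.trans (List.drop_suffix k s).isInfix
  have hnn : 0 ≤ PySem.Chars.find s sub := (PySem.Chars.find_nonneg_iff s sub).mpr hinf
  obtain ⟨hp2, hmin2⟩ := PySem.Chars.find_spec hnn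
  have hmk : (PySem.Chars.find s sub).toNat = k := by
    rcases Nat.lt_trichotomy (PySem.Chars.find s sub).toNat k with h | h | h
    · exact absurd hp2 (hmin _ h)
    · exact h
    · exact absurd hp (hmin2 k h)
  omega

theorem find_cons_step (c : Char) (s sub : List Char) (hnp : ¬ sub <+: (c :: s)) :
    PySem.Chars.find (c :: s) sub =
      if PySem.Chars.find s sub = -1 then -1 else PySem.Chars.find s sub + 1 := by
  by_cases hs : PySem.Chars.find s sub = -1
  · rw [if_pos hs]
    rw [PySem.Chars.find_eq_neg_one_iff] at hs ⊢
    intro hinf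
    apply hs
    obtain ⟨j, hj⟩ := (PySem.Chars.exists_prefix_drop_iff_isIn sub (c :: s)).mpr
      ((PySem.Chars.isIn_iff_infix sub (c :: s)).mpr hinf)
    match j with
    | 0 => exact absurd (by simpa using hj) hnp
    | j + 1 =>
      rw [List.drop_succ_cons] at hj
      exact (PySem.Chars.isIn_iff_infix sub s).mp
        ((PySem.Chars.exists_prefix_drop_iff_isIn sub s).mp ⟨j, hj⟩)
  · rw [if_neg hs]
    have hnn : 0 ≤ PySem.Chars.find s sub := by
      have := PySem.Chars.neg_one_le_find s sub; omega
    obtain ⟨hp2, hmin2⟩ := PySem.Chars.find_spec hnn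
    have hstep : PySem.Chars.find (c :: s) sub = (((PySem.Chars.find s sub).toNat + 1 : Nat) : Int) := by
      apply find_eq_of_first
      · rw [List.drop_succ_cons]; exact hp2
      · intro i hi
        match i with
        | 0 => simpa using hnp
        | i + 1 =>
          rw [List.drop_succ_cons]
          exact hmin2 i (by omega)
    rw [hstep]
    omega

theorem pvScan_zero (x y : Char) (s : List Char) (h : ¬ ([x, y] <:+: s)) :
    pvScan x y s = 0 := by
  revert h
  fun_induction pvScan x y s with
  | case1 c d t hcd ih =>
    intro h
    obtain ⟨rfl, rfl⟩ := hcd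
    exact absurd (List.IsPrefix.isInfix ⟨t, rfl⟩) h
  | case2 c d t hcd ih =>
    intro h
    exact ih (fun hinf => h (hinf.trans (List.suffix_cons c (d :: t)).isInfix))
  | case3 l hl =>
    intro _
    rfl

theorem pvScan_split (x y : Char) (s : List Char) : ∀ (k : Nat),
    PySem.Chars.find s [x, y] = (k : Int) →
    pvScan x y s = max (pvRun x y (List.drop k s))
      (pvScan x y (List.drop (k + 2 * pvRun x y (List.drop k s)) s)) := by
  fun_induction pvScan x y s with
  | case1 c d t hcd ih =>
    intro k hfind
    have hpre : [x, y] <+: c :: d :: t := by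
      obtain ⟨rfl, rfl⟩ := hcd
      exact ⟨t, rfl⟩
    have h0 : PySem.Chars.find (c :: d :: t) [x, y] = ((0 : Nat) : Int) := by
      apply find_eq_of_first
      · simpa using hpre
      · intro i hi; omega
    have hk : k = 0 := by rw [h0] at hfind; omega
    subst hk
    simp [List.drop_zero]
  | case2 c d t hcd ih =>
    intro k hfind
    have hnp : ¬ [x, y] <+: (c :: d :: t) := by
      intro hp
      obtain ⟨t', ht'⟩ := (prefix_pair x y _).mp hp
      injection ht' with h1 h2
      injection h2 with h2 h3
      exact hcd ⟨h1, h2⟩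
    have hstep := find_cons_step c (d :: t) [x, y] hnp
    rw [hfind] at hstep
    by_cases h2 : PySem.Chars.find (d :: t) [x, y] = -1
    · rw [if_pos h2] at hstep; omega
    · rw [if_neg h2] at hstep
      have hnn : 0 ≤ PySem.Chars.find (d :: t) [x, y] := by
        have := PySem.Chars.neg_one_le_find (d :: t) [x, y]; omega
      obtain ⟨j, rfl⟩ : ∃ j, k = j + 1 := ⟨k - 1, by omega⟩
      have hfd : PySem.Chars.find (d :: t) [x, y] = (j : Int) := by push_cast at hstep ⊢; omega
      have hdk : List.drop (j + 1) (c :: d :: t) = List.drop j (d :: t) :=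
        List.drop_succ_cons ..
      rw [hdk]
      have hdk2 : List.drop (j + 1 + 2 * pvRun x y (List.drop j (d :: t))) (c :: d :: t)
          = List.drop (j + 2 * pvRun x y (List.drop j (d :: t))) (d :: t) := by
        rw [show j + 1 + 2 * pvRun x y (List.drop j (d :: t))
            = (j + 2 * pvRun x y (List.drop j (d :: t))) + 1 by omega]
        exact List.drop_succ_cons ..
      rw [hdk2]
      exact ih j hfd
  | case3 l hl =>
    intro k hfind
    exfalso
    have hinf : [x, y] <:+: l := by
      rw [← PySem.Chars.find_nonneg_iff, hfind]
      omega
    have hlen := hinf.length_le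
    match l, hl with
    | [], _ => simp at hlen
    | [a], _ => simp at hlen
    | a :: b :: t, hl => exact hl a b t rfl

theorem firstLoop_eq (fuel : Nat) (s : List Char) (x y : Char) :
    ∀ (i : Nat) (c : Int), s.length - i < fuel →
      firstLoop fuel s [x, y] i c = c + ((pvRun x y (List.drop i s) : Nat) : Int) := by
  induction fuel with
  | zero => intro i c h; omega
  | succ fuel ih =>
    intro i c h
    have hlen2 : (i + [x, y].length) = i + 2 := by simp
    by_cases hsl : PySem.List.slice s (some (i : Int)) (some ((i + [x, y].length : Nat) : Int)) = [x, y]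
    · rw [firstLoop, if_pos hsl]
      have htake : List.take 2 (List.drop i s) = [x, y] := by
        rw [PySem.List.slice_natCast] at hsl
        rw [hlen2] at hsl
        rwa [show i + 2 - i = 2 by omega] at hsl
      obtain ⟨t, ht⟩ := (take_two_pair x y _).mp htake
      have hdd : List.drop (i + 2) s = t := by
        have h3 := congrArg (List.drop 2) ht
        rw [List.drop_drop] at h3
        simpa [Nat.add_comm] using h3
      have hbound : i + 2 ≤ s.length := by
        have := List.length_drop (l := s) (i := i)
        rw [ht] at this
        simp at this
        omega
      rw [hlen2, ih (i + 2) (c + 1) (by omega), hdd, ht]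
      have : pvRun x y (x :: y :: t) = pvRun x y t + 1 := by simp [pvRun]
      rw [this]
      push_cast
      ring
    · rw [firstLoop, if_neg hsl]
      have hrun : pvRun x y (List.drop i s) = 0 := by
        rcases hdi : List.drop i s with _ | ⟨a, _ | ⟨b, t⟩⟩
        · rfl
        · rfl
        · simp only [pvRun]
          rw [if_neg]
          rintro ⟨rfl, rfl⟩
          apply hsl
          rw [PySem.List.slice_natCast, hlen2, show i + 2 - i = 2 by omega, hdi]
          rfl
      rw [hrun]
      simp

theorem firstSSR_run (s : List Char) (x y : Char) (hu : PySem.Chars.upper s = s)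
    (hxy : PySem.Chars.upper [x, y] = [x, y]) (hd : s ≠ [])
    (hf : PySem.Chars.find s [x, y] ≠ -1) :
    (firstSSR s [x, y]).getD 0 =
      ((pvRun x y (List.drop (PySem.Chars.find s [x, y]).toNat s) : Nat) : Int) := by
  unfold firstSSR
  rw [if_neg (by simp [hd])]
  simp only [hu, hxy]
  rw [if_neg hf, Option.getD_some]
  rw [firstLoop_eq (s.length + 1) s x y _ 0 (by omega)]
  omega

theorem longestLoop_eq (fuel : Nat) : ∀ (s : List Char) (x y : Char) (L : Int),
    s.length < fuel → PySem.Chars.upper s = s → PySem.Chars.upper [x, y] = [x, y] → 0 ≤ L →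
    longestLoop fuel s [x, y] L = max L ((pvScan x y s : Nat) : Int) := by
  induction fuel with
  | zero => intro s x y L h; omega
  | succ fuel ih =>
    intro s x y L hlen hu hxy hL
    by_cases hf : PySem.Chars.find s [x, y] = -1
    · rw [longestLoop, if_pos hf]
      rw [pvScan_zero x y s ((PySem.Chars.find_eq_neg_one_iff s [x, y]).mp hf)]
      simp
      omega
    · rw [longestLoop, if_neg hf]
      have hnn : 0 ≤ PySem.Chars.find s [x, y] := by
        have := PySem.Chars.neg_one_le_find s [x, y]; omega
      have hinf : [x, y] <:+: s := (PySem.Chars.find_nonneg_iff s [x, y]).mp hnn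
      have hd : s ≠ [] := by
        intro he; subst he
        simpa using hinf.length_le
      have hfk : PySem.Chars.find s [x, y] = (((PySem.Chars.find s [x, y]).toNat : Nat) : Int) := by
        omega
      obtain ⟨hp2, _⟩ := PySem.Chars.find_spec hnn
      obtain ⟨t, ht⟩ := (prefix_pair x y _).mp hp2
      have hr1 : 1 ≤ pvRun x y (List.drop (PySem.Chars.find s [x, y]).toNat s) := by
        rw [ht]
        simp [pvRun]
      rw [firstSSR_run s x y hu hxy hd hf]
      rw [show ((List.length [x, y] : Nat) : Int) = 2 from by norm_num]
      set k := (PySem.Chars.find s [x, y]).toNat with hkdef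
      set r := pvRun x y (List.drop k s) with hrdef
      have hslice : PySem.List.slice s (some (PySem.Chars.find s [x, y] + ((r : Nat) : Int) * 2)) none
          = List.drop (k + 2 * r) s := by
        rw [PySem.List.slice_from s (by omega)]
        congr 1
        omega
      have hite : (if L < ((r : Nat) : Int) then ((r : Nat) : Int) else L) = max L ((r : Nat) : Int) := by
        rw [max_def]
        split_ifs <;> omega
      change longestLoop fuel
          (PySem.List.slice s (some (PySem.Chars.find s [x, y] + ((r : Nat) : Int) * 2)) none)
          [x, y] (if L < ((r : Nat) : Int) then ((r : Nat) : Int) else L)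
        = max L ((pvScan x y s : Nat) : Int)
      rw [hslice, hite]
      have hlend : (List.drop (k + 2 * r) s).length < fuel := by
        rw [List.length_drop]
        have h1 : 1 ≤ s.length := by
          cases s
          · exact absurd rfl hd
          · simp
        omega
      rw [ih (List.drop (k + 2 * r) s) x y (max L ((r : Nat) : Int)) hlend
        (upper_drop s _ hu) hxy (le_trans hL (le_max_left _ _))]
      rw [pvScan_split x y s k (by omega)]
      rw [← hrdef]
      rw [Nat.cast_max]
      rw [max_assoc]

theorem longestSSR_eq (u : List Char) (x y : Char) (hu : PySem.Chars.upper u = u)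
    (hxy : PySem.Chars.upper [x, y] = [x, y]) (hd : u ≠ []) :
    (longestSSR u [x, y]).getD 0 = ((pvScan x y u : Nat) : Int) := by
  unfold longestSSR
  rw [if_neg (by simp [hd])]
  simp only [hu, hxy]
  by_cases hf : PySem.Chars.find u [x, y] = -1
  · rw [if_pos hf, Option.getD_some]
    rw [pvScan_zero x y u ((PySem.Chars.find_eq_neg_one_iff u [x, y]).mp hf)]
    rfl
  · rw [if_neg hf, Option.getD_some]
    rw [longestLoop_eq (u.length + 1) u x y 0 (by omega) hu hxy le_rfl]
    exact max_eq_right (by positivity)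

theorem step_eq (u : List Char) (hu : PySem.Chars.upper u = u) (hd : u ≠ [])
    (din : String) (x y : Char) (htl : din.toList = [x, y])
    (hxy : PySem.Chars.upper [x, y] = [x, y]) (st : List String × Int) :
    (let ssr := (longestSSR u din.toList).getD 0
     if st.2 < ssr then ([din], ssr)
     else if ssr = st.2 then (st.1 ++ [din], st.2)
     else st)
    = (let m : Int :=
        match din.toList with
        | x' :: y' :: _ => ((pvScan x' y' u : Nat) : Int)
        | _ => 0
       if st.2 < m then ([din], m)
       else if m = st.2 then (st.1 ++ [din], st.2)
       else st) := by
  rw [htl]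
  simp only []
  rw [longestSSR_eq u x y hu hxy hd]

-- ===== VERDICT (by name: the statement is the Claim_ definition above) =====
set_option maxHeartbeats 1000000 in
theorem longestSSRdin_spec : Claim_equal_longestSSRdin := by
  intro dna _
  unfold Spec_longestSSRdin longestSSRdin longestSSRdin_alt
  by_cases hlt : (PySem.Str.len dna : Int) < 2
  · rw [if_pos hlt, if_pos hlt]
  · rw [if_neg hlt, if_neg hlt]
    have hlen : 2 ≤ dna.toList.length := by
      have he := PySem.Str.len_eq dna
      omega
    have hd0 : dna.toList ≠ [] := by
      intro h
      rw [h] at hlen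
      simp at hlen
    have hu : PySem.Chars.upper (PySem.Chars.upper dna.toList) = PySem.Chars.upper dna.toList :=
      upper_idem _
    have hdu : PySem.Chars.upper dna.toList ≠ [] := upper_ne_nil _ hd0
    refine congrArg some (PySem.List.foldl_congr_mem _ _ _ _ ?_)
    intro acc din hmem
    simp only [pvDinucleotides, List.mem_cons, List.not_mem_nil, or_false] at hmem
    rcases hmem with rfl | rfl | rfl | rfl | rfl | rfl | rfl | rfl | rfl | rfl | rfl | rfl | rfl | rfl | rfl | rfl
    · exact step_eq _ hu hdu "AA" 'A' 'A' (by decide) (by decide) acc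
    · exact step_eq _ hu hdu "AT" 'A' 'T' (by decide) (by decide) acc
    · exact step_eq _ hu hdu "AC" 'A' 'C' (by decide) (by decide) acc
    · exact step_eq _ hu hdu "AG" 'A' 'G' (by decide) (by decide) acc
    · exact step_eq _ hu hdu "TT" 'T' 'T' (by decide) (by decide) acc
    · exact step_eq _ hu hdu "TA" 'T' 'A' (by decide) (by decide) acc
    · exact step_eq _ hu hdu "TC" 'T' 'C' (by decide) (by decide) acc
    · exact step_eq _ hu hdu "TG" 'T' 'G' (by decide) (by decide) acc
    · exact step_eq _ hu hdu "CC" 'C' 'C' (by decide) (by decide) acc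
    · exact step_eq _ hu hdu "CG" 'C' 'G' (by decide) (by decide) acc
    · exact step_eq _ hu hdu "CT" 'C' 'T' (by decide) (by decide) acc
    · exact step_eq _ hu hdu "CA" 'C' 'A' (by decide) (by decide) acc
    · exact step_eq _ hu hdu "GG" 'G' 'G' (by decide) (by decide) acc
    · exact step_eq _ hu hdu "GC" 'G' 'C' (by decide) (by decide) acc
    · exact step_eq _ hu hdu "GA" 'G' 'A' (by decide) (by decide) acc
    · exact step_eq _ hu hdu "GT" 'G' 'T' (by decide) (by decide) acc
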